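-- pv_equiv track=rewrite | github.com/Aloha-Churchill/pure-math | genome.py | frequencyPerLength
-- ===== SOURCE A (Python) =====
-- def frequencyPerLength(genome, length, nucleotide):
--     start = 0
--     end = start+length
--     frequency = []
--     count = 0
--     while end < len(genome):
--         for i in range(start, end):
--             if genome[i] == nucleotide:
--                 count += 1
--         start = end
--         end = end+length
--         frequency.append(count)
--         count = 0
--     return frequency
-- ===== SOURCE B (Python) =====
-- def frequencyPerLength(genome, length, nucleotide):
--     pref = [0]
--     c = 0
--     for ch in genome:
--         if ch == nucleotide:
--             c += 1
--         pref.append(c)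
--     return [pref[s + length] - pref[s]
--             for s in range(0, len(genome) - length, length)]
-- ===== Notes on version B (the rewrite author's own statement) =====
-- stated objective: alternative
-- what changed: Replaces the nested while/for per-block rescan with a single-pass prefix-count array followed by O(1) block differences over range(0, len(genome)-length, length).
-- outside the precondition, e.g. on frequencyPerLength('', 0, 'A'): A returns [], B raises ValueError
import Mathlib
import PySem

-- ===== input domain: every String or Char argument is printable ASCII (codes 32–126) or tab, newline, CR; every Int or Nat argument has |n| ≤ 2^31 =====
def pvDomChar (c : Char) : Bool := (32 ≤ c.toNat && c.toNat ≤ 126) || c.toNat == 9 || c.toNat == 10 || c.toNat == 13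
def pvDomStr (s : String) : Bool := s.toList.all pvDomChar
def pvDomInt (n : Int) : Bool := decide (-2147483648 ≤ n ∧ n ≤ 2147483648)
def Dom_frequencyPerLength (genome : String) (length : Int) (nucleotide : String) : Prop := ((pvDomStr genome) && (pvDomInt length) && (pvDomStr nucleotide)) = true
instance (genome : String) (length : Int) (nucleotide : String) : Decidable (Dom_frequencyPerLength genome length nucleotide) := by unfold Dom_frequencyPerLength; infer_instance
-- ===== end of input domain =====

-- B replaces A's per-block rescan by a one-pass prefix-count table plus block differences (objective: alternative decomposition, same cost).

-- ===== PORT A =====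
-- inner 'for i in range(start, end): if genome[i] == nucleotide: count += 1'
-- (indices are always in range while the while-loop runs; pyGetD's default is a totality guard only)
def fplCount (g : List Char) (nuc : String) (s e : Int) : Int :=
  (PySem.List.pyRange s e 1).foldl
    (fun c i => if String.mk [PySem.List.pyGetD g i ' '] == nuc then c + 1 else c) 0

-- the 'while end < len(genome)' loop; fuel (length of genome + 1) bounds the iterations,
-- which suffices whenever length ≥ 1 (Pre_); outside Pre_ A does not terminate.
def fplLoop (g : List Char) (nuc : String) (L : Int) :
    Nat → Int → Int → List Int → List Int
  | 0, _, _, freq => freq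
  | fuel + 1, s, e, freq =>
    if e < (g.length : Int) then
      fplLoop g nuc L fuel e (e + L) (freq ++ [fplCount g nuc s e])
    else freq

def frequencyPerLength (genome : String) (length : Int) (nucleotide : String) : List Int :=
  fplLoop genome.toList nucleotide length (genome.toList.length + 1) 0 length []

-- ===== PORT B =====
-- prefix-count array: pref[i] = occurrences of nucleotide in genome[:i]
def fplPref (g : List Char) (nuc : String) : List Int :=
  (g.foldl
    (fun (acc : List Int × Int) ch =>
      let c := if String.mk [ch] == nuc then acc.2 + 1 else acc.2
      (acc.1 ++ [c], c))
    ([0], 0)).1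

def frequencyPerLength_alt (genome : String) (length : Int) (nucleotide : String) : List Int :=
  let pref := fplPref genome.toList nucleotide
  (PySem.List.pyRange 0 ((genome.toList.length : Int) - length) length).map
    (fun s => PySem.List.pyGetD pref (s + length) 0 - PySem.List.pyGetD pref s 0)

-- ===== PRECONDITION & SPEC =====
-- Pre_ excludes length ≤ 0: there A loops forever, except at the single degenerate point
-- genome = "" with length = 0 where A returns [] but B's range(..., 0) raises ValueError.
def Pre_frequencyPerLength (genome : String) (length : Int) (nucleotide : String) : Prop :=
  1 ≤ length
instance (genome : String) (length : Int) (nucleotide : String) : Decidable (Pre_frequencyPerLength genome length nucleotide) := by unfold Pre_frequencyPerLength; infer_instance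

def pvWitness_frequencyPerLength : String × Int × String := ("ACACA", 2, "A")

def Spec_frequencyPerLength (genome : String) (length : Int) (nucleotide : String) (out : List Int) : Prop := out = frequencyPerLength_alt genome length nucleotide
instance (genome : String) (length : Int) (nucleotide : String) (out : List Int) : Decidable (Spec_frequencyPerLength genome length nucleotide out) := by unfold Spec_frequencyPerLength; infer_instance

-- ===== CLAIM (what is proved, stated in full; the proofs are below) =====
def Claim_equal_frequencyPerLength : Prop := ∀ (genome : String) (length : Int) (nucleotide : String), Dom_frequencyPerLength genome length nucleotide → Pre_frequencyPerLength genome length nucleotide → Spec_frequencyPerLength genome length nucleotide (frequencyPerLength genome length nucleotide)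

-- ===== LEMMAS AND PROOFS =====

-- number of matches in the first i characters
def pvCnt (nuc : String) (g : List Char) (i : Nat) : Int :=
  ((g.take i).countP (fun ch => String.mk [ch] == nuc) : Nat)

theorem pvCnt_succ (nuc : String) (g : List Char) (m : Nat) (hm : m < g.length) :
    pvCnt nuc g (m + 1) =
      pvCnt nuc g m + (if String.mk [g[m]] == nuc then 1 else 0) := by
  unfold pvCnt
  rw [List.take_add_one, List.getElem?_eq_getElem hm, List.countP_append]
  by_cases hp : String.mk [g[m]] == nuc
  · simp [List.countP_cons, hp]
  · simp [List.countP_cons, hp]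

-- positive-step range is empty when the bound is reached
theorem pvRange_pos_nil {a b s : Int} (hs : 0 < s) (h : b ≤ a) :
    PySem.List.pyRange a b s = [] := by
  rw [PySem.List.pyRange_of_pos a b hs]
  simp [show ¬ a < b by omega]

-- cons form of a positive-step range
theorem pvRange_pos_cons {a b s : Int} (hs : 0 < s) (h : a < b) :
    PySem.List.pyRange a b s = a :: PySem.List.pyRange (a + s) b s := by
  rw [PySem.List.pyRange_of_pos a b hs, PySem.List.pyRange_of_pos (a + s) b hs]
  have key : b - a + s - 1 = (b - a - 1) + 1 * s := by ring
  have h1 : (b - a + s - 1) / s = (b - a - 1) / s + 1 := by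
    rw [key, Int.add_mul_ediv_right _ _ (by omega : s ≠ 0)]
  have hq : 0 ≤ (b - a - 1) / s := Int.ediv_nonneg (by omega) (by omega)
  have hm : (if a < b then ((b - a + s - 1) / s).toNat else 0) = ((b - a - 1) / s).toNat + 1 := by
    rw [if_pos h, h1]; omega
  have hm' : (if a + s < b then ((b - (a + s) + s - 1) / s).toNat else 0) = ((b - a - 1) / s).toNat := by
    by_cases hc : a + s < b
    · rw [if_pos hc]
      congr 1
      congr 1
      ring_nf
    · rw [if_neg hc]
      have : (b - a - 1) / s = 0 := Int.ediv_eq_zero_of_lt (by omega) (by omega)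
      rw [this]; rfl
  rw [hm, hm', List.range_succ_eq_map]
  simp [List.map_map, Function.comp]
  intro k _
  ring

-- A's inner for-loop counts by prefix difference
theorem fplCount_eq (g : List Char) (nuc : String) (s : Int) (k : Nat)
    (hs : 0 ≤ s) (hk : s + k ≤ (g.length : Int)) :
    fplCount g nuc s (s + k) = pvCnt nuc g (s + k).toNat - pvCnt nuc g s.toNat := by
  induction k with
  | zero =>
    unfold fplCount
    rw [show s + (0 : Nat) = s by simp, PySem.List.pyRange_one_eq_nil (le_refl s)]
    simp
  | succ m ih =>
    unfold fplCount at ih ⊢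
    have h1 : s + ((m : Int) + 1) = (s + m) + 1 := by ring
    rw [show ((m + 1 : Nat) : Int) = (m : Int) + 1 by push_cast; ring, h1,
      PySem.List.pyRange_one_succ_right (by omega), List.foldl_append]
    rw [ih (by omega)]
    have hlt : (s + m).toNat < g.length := by omega
    rw [List.foldl_cons, List.foldl_nil,
      PySem.List.pyGetD_eq_getElem g ' ' (by omega) (by omega)]
    have hsucc := pvCnt_succ nuc g (s + m).toNat hlt
    have htn : ((s + m) + 1).toNat = (s + m).toNat + 1 := by omega
    rw [htn, hsucc]
    split_ifs <;> ring

-- the while-loop produces the per-block prefix differences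
theorem fplLoop_eq (g : List Char) (nuc : String) (L : Int) (hL : 1 ≤ L) :
    ∀ (fuel : Nat) (s : Int) (freq : List Int), 0 ≤ s →
      (g.length : Int) - (s + L) ≤ (fuel : Int) →
      fplLoop g nuc L fuel s (s + L) freq =
        freq ++ (PySem.List.pyRange s ((g.length : Int) - L) L).map
          (fun t => pvCnt nuc g (t + L).toNat - pvCnt nuc g t.toNat) := by
  intro fuel
  induction fuel with
  | zero =>
    intro s freq hs hfuel
    rw [pvRange_pos_nil (by omega) (by omega)]
    simp [fplLoop]
  | succ m ih =>
    intro s freq hs hfuel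
    unfold fplLoop
    by_cases hc : s + L < (g.length : Int)
    · rw [if_pos hc]
      have hrec := ih (s + L) (freq ++ [fplCount g nuc s (s + L)]) (by omega) (by push_cast at hfuel ⊢; omega)
      rw [hrec, pvRange_pos_cons (by omega) (by omega : s < (g.length : Int) - L)]
      have hk : s + L = s + (L.toNat : Int) := by omega
      rw [List.map_cons, List.append_assoc, List.singleton_append]
      congr 2
      rw [hk]
      exact fplCount_eq g nuc s L.toNat hs (by omega)
    · rw [if_neg hc, pvRange_pos_nil (by omega) (by omega)]
      simp

-- the prefix-count fold builds the table of pvCnt values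
theorem fplPref_fold (nuc : String) :
    ∀ (g : List Char) (pre : List Int) (c0 : Int),
      (g.foldl
        (fun (acc : List Int × Int) ch =>
          let c := if String.mk [ch] == nuc then acc.2 + 1 else acc.2
          (acc.1 ++ [c], c))
        (pre, c0)).1 =
      pre ++ (List.range g.length).map (fun i => c0 + pvCnt nuc g (i + 1)) := by
  intro g
  induction g with
  | nil => intro pre c0; simp
  | cons ch gs ih =>
    intro pre c0
    rw [List.foldl_cons]
    simp only
    rw [ih]
    have hδ : pvCnt nuc (ch :: gs) 1 = (if String.mk [ch] == nuc then 1 else 0) := by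
      unfold pvCnt
      simp [List.countP_cons]
    have hrest : ∀ i : Nat, pvCnt nuc (ch :: gs) (i + 1 + 1) =
        pvCnt nuc (ch :: gs) 1 + pvCnt nuc gs (i + 1) := by
      intro i
      unfold pvCnt
      simp [List.countP_cons]
      split_ifs <;> push_cast <;> ring
    rw [List.length_cons, List.range_succ_eq_map, List.map_cons, List.map_map,
        List.append_assoc, List.singleton_append]
    congr 1
    congr 1
    · rw [hδ]; split_ifs <;> ring
    · apply List.map_congr_left
      intro i _
      simp only [Function.comp]
      rw [show i + 1 + 1 = (i + 1) + 1 from rfl, hrest i, hδ]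
      split_ifs <;> ring

theorem fplPref_eq (g : List Char) (nuc : String) :
    fplPref g nuc = (List.range (g.length + 1)).map (fun i => pvCnt nuc g i) := by
  unfold fplPref
  rw [fplPref_fold nuc g [0] 0, List.range_succ_eq_map]
  simp only [List.map_cons, List.map_map, Function.comp, List.singleton_append]
  rw [List.cons_eq_cons]
  refine ⟨?_, ?_⟩
  · unfold pvCnt; simp
  · apply List.map_congr_left; intro i _; simp

-- indexing the prefix table
theorem fplPref_getD (g : List Char) (nuc : String) (t : Int)
    (h0 : 0 ≤ t) (h1 : t ≤ (g.length : Int)) :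
    PySem.List.pyGetD (fplPref g nuc) t 0 = pvCnt nuc g t.toNat := by
  rw [fplPref_eq]
  rw [PySem.List.pyGetD_eq_getElem _ 0 h0 (by simp [List.length_map, List.length_range]; omega)]
  rw [List.getElem_map, List.getElem_range]

-- ===== VERDICT (by name: the statement is the Claim_ definition above) =====
theorem frequencyPerLength_spec : Claim_equal_frequencyPerLength := by
  intro genome L nuc _hdom hL
  unfold Spec_frequencyPerLength frequencyPerLength frequencyPerLength_alt
  have hL' : 1 ≤ L := hL
  set g := genome.toList with hg
  have hloop := fplLoop_eq g nuc L hL' (g.length + 1) 0 [] (le_refl 0) (by push_cast; omega)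
  rw [zero_add] at hloop
  rw [hloop, List.nil_append]
  apply List.map_congr_left
  intro t ht
  have hmem := (PySem.List.mem_pyRange_iff_of_pos (by omega : (0:Int) < L) t).mp ht
  obtain ⟨ht0, ht1, -⟩ := hmem
  rw [fplPref_getD g nuc (t + L) (by omega) (by omega),
    fplPref_getD g nuc t (by omega) (by omega)]
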